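-- pv_equiv track=rewrite | github.com/yunsikus/Algortithm-Practice | src/Simulation/Baekjun-17140-이차원배열과연산.py | row_c
-- ===== SOURCE A (Python) =====
-- from collections import Counter
--
-- def row_c(my_mat):
--     for i in range(len(my_mat)):
--         my_mat[i].sort()
--         c = Counter(my_mat[i]) # 1) 각 row에 차례로 접근하여 원소의 개수를 구함
--         new_array = [x for x in c.items() if x[0] != 0] # 2) 0을 제외
--         new_array.sort(key = lambda x: x[1]) # 3) 적게 등장하는 원소부터 등장하도록 정렬함
--         my_mat[i] = [y for x in new_array for y in x] # nested_list를 풀어줘야함 ex) [(2,1),(1,2)] -> [2,1,1,2]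
--
--     # 4) 최대 행길이를 찾고 나머지 행들을 0으로 채우기
--     max_len = max([len(x) for x in my_mat])
--     for i in range(len(my_mat)):
--         if len(my_mat[i]) < max_len:
--             my_mat[i] += [0]*(max_len - len(my_mat[i]))
--
--     # 5) 행 또는 열의 크기가 100을 넘어가는 경우 처음 100개를 제외한 나머지를 버림
--     my_mat = my_mat[:100]
--     my_mat = [x[:100] for x in my_mat]
--
--     return my_mat
-- ===== SOURCE B (Python) =====
-- def row_c(my_mat):
--     # Count each row in one pass (no row sort); then emit at most the first
--     # 100 entries of each of the first 100 rows by repeatedly extracting the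
--     # lexicographically smallest (count, value) pair from a set (early-stopping
--     # partial selection instead of a full sort); pad/trim fused.  Builds a new
--     # list (A mutates its argument in place; equivalence is about the return
--     # value only).
--     counts = []
--     for row in my_mat:
--         cnt = {}
--         for v in row:
--             if v != 0:
--                 cnt[v] = cnt.get(v, 0) + 1
--         counts.append(cnt)
--     max_len = max(2 * len(c) for c in counts)
--     out = []
--     for cnt in counts[:100]:
--         pairs = {(c, v) for v, c in cnt.items()}
--         new = []
--         while pairs and len(new) < 100:
--             p = min(pairs)
--             pairs.remove(p)
--             new.append(p[1])
--             new.append(p[0])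
--         out.append((new + [0] * (max_len - 2 * len(cnt)))[:100])
--     return out
-- ===== Notes on version B (the rewrite author's own statement) =====
-- stated objective: alternative
-- what changed: B never sorts: it counts each row in one pass into a dict, then builds each output row by repeatedly extracting the lexicographically smallest (count, value) pair from a set, stopping as soon as 100 entries are emitted (at most 50 extractions, since the result is trimmed to 100 columns), with padding and trimming fused into the emit step; A sorts the row, Counters it and comparison-sorts the items before padding and trimming in separate passes.
import Mathlib
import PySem

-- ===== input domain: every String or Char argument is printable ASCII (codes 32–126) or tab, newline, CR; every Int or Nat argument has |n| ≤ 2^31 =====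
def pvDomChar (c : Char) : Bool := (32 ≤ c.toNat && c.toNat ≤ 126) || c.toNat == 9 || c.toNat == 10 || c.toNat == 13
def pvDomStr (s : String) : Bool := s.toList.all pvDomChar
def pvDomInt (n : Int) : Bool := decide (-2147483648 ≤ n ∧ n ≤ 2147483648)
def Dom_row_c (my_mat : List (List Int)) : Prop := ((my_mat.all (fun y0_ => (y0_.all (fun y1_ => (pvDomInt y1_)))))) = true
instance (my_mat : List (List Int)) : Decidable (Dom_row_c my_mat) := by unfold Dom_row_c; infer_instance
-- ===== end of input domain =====

-- B replaces A's per-row sort + Counter + stable sort of the items with a single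
-- counting pass and an early-stopping selection loop that extracts only the at
-- most 50 (count, value) pairs that survive the 100-column trim; pad/trim are
-- fused.  A mutates its argument in place, B builds a new list: the equivalence
-- proved here is about the RETURN value only.

-- ===== PORT A =====
-- per-row body of A's first loop: sort the row, Counter, drop 0, stable sort by count, flatten pairs
def pvARow (row : List Int) : List Int :=
  let srow := PySem.List.sorted row (fun x => x)
  let c := PySem.Dict.counter srow
  let newArray := c.items.filter (fun p => !(p.1 == 0))
  let arr := PySem.List.sorted newArray (fun p => p.2)
  arr.flatMap (fun p => [p.1, p.2])

def row_c (my_mat : List (List Int)) : List (List Int) :=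
  let m1 := my_mat.map pvARow
  -- max([len(x) for x in my_mat]) : raises ValueError on []; Pre_row_c excludes that input
  let maxLen : Int := (PySem.List.max? (m1.map (fun r => (r.length : Int))) (fun y => y)).getD 0
  let m2 := m1.map (fun r => if (r.length : Int) < maxLen then r ++ PySem.List.pyRepeat [0] (maxLen - (r.length : Int)) else r)
  (PySem.List.slice m2 none (some 100)).map (fun r => PySem.List.slice r none (some 100))

-- ===== PORT B =====
-- one counting pass over the row: cnt[v] = cnt.get(v, 0) + 1 for nonzero v
def pvCount (row : List Int) : PySem.Dict Int Int :=
  row.foldl (fun cnt v => if v != 0 then cnt.insert v (cnt.getD v 0 + 1) else cnt) PySem.Dict.empty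

-- lexicographic comparison of Python pairs of ints (exact: tuple <)
def pvLexLt (a b : Int × Int) : Bool := a.1 < b.1 || (a.1 == b.1 && a.2 < b.2)

-- min(pairs): left fold keeping the smaller pair (exact: min of a nonempty iterable)
def pvMin (h : Int × Int) (t : List (Int × Int)) : Int × Int :=
  t.foldl (fun m x => if pvLexLt x m then x else m) h

theorem pvMin_mem (t : List (Int × Int)) : ∀ h, pvMin h t ∈ h :: t := by
  induction t with
  | nil => intro h; simp [pvMin]
  | cons x t ih =>
      intro h
      have hstep : pvMin h (x :: t) = pvMin (if pvLexLt x h then x else h) t := by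
        simp [pvMin]
      rw [hstep]
      by_cases hx : pvLexLt x h = true
      · rw [if_pos hx]
        rcases List.mem_cons.mp (ih x) with h1 | h1 <;> simp [h1]
      · rw [if_neg hx]
        rcases List.mem_cons.mp (ih h) with h1 | h1 <;> simp [h1]

-- the while loop: extract the minimum pair, append value then count, stop at 100 entries
def pvSelLoop (pairs : List (Int × Int)) (nw : List Int) : List Int :=
  match pairs with
  | [] => nw
  | h :: t =>
    if nw.length < 100 then
      let p := pvMin h t
      pvSelLoop (PySem.Set.discard (h :: t) p) (nw ++ [p.2, p.1])
    else nw
termination_by pairs.length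
decreasing_by
  simp only [PySem.Set.discard]
  exact List.length_filter_lt_length_iff_exists.mpr ⟨pvMin h t, pvMin_mem t h, by simp⟩

def row_c_alt (my_mat : List (List Int)) : List (List Int) :=
  let counts := my_mat.map pvCount
  -- max(2 * len(c) for c in counts) : raises ValueError on []; Pre_row_c excludes that input
  let maxLen : Int := (PySem.List.max? (counts.map (fun c => (2 * (PySem.Dict.size c : Int)))) (fun y => y)).getD 0
  (PySem.List.slice counts none (some 100)).map (fun cnt =>
    let pairs := PySem.Set.ofList (cnt.items.map (fun p => (p.2, p.1)))
    let nw := pvSelLoop pairs []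
    PySem.List.slice (nw ++ PySem.List.pyRepeat [0] (maxLen - 2 * (PySem.Dict.size cnt : Int))) none (some 100))

-- ===== PRECONDITION & SPEC =====
-- Pre_ excludes only the empty matrix, on which A (and B) raise ValueError (max of an empty sequence).
def Pre_row_c (my_mat : List (List Int)) : Prop := my_mat ≠ []
instance (my_mat : List (List Int)) : Decidable (Pre_row_c my_mat) := by unfold Pre_row_c; infer_instance
def pvWitness_row_c : List (List Int) := [[1, 2, 1, 0], [3]]

def Spec_row_c (my_mat : List (List Int)) (out : List (List Int)) : Prop := out = row_c_alt my_mat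
instance (my_mat : List (List Int)) (out : List (List Int)) : Decidable (Spec_row_c my_mat out) := by unfold Spec_row_c; infer_instance

-- ===== CLAIM (what is proved, stated in full; the proofs are below) =====
def Claim_equal_row_c : Prop := ∀ (my_mat : List (List Int)), Dom_row_c my_mat → Pre_row_c my_mat → Spec_row_c my_mat (row_c my_mat)

-- ===== LEMMAS AND PROOFS =====

-- ---- generic PySem facts (A-side characterisation) ----

theorem pv_discard_sublist {α : Type} [BEq α] (s : PySem.Set α) (x : α) :
    (PySem.Set.discard s x).Sublist s := by
  simp [PySem.Set.discard]

theorem pv_ofList_sublist {α : Type} [BEq α] [LawfulBEq α] (xs : List α) :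
    (PySem.Set.ofList xs).Sublist xs := by
  induction xs with
  | nil => simp [PySem.Set.ofList_nil]
  | cons x xs ih =>
      rw [PySem.Set.ofList_cons]
      exact List.Sublist.cons₂ x ((pv_discard_sublist _ x).trans ih)

-- inserting x between a prefix it is not "before" and a suffix it is "before"
theorem pv_insertBy_middle {α : Type} (before : α → α → Bool) (x : α) :
    ∀ (l r : List α), (∀ y ∈ l, before x y = false) →
      (∀ h ∈ r.head?, before x h = true) →
      PySem.List.insertBy before x (l ++ r) = l ++ x :: r := by
  intro l r hl hr
  induction l with
  | nil =>
      cases r with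
      | nil => simp [PySem.List.insertBy]
      | cons h t => simp [PySem.List.insertBy, hr h rfl]
  | cons y l ih =>
      have hy : before x y = false := hl y (by simp)
      simp only [List.cons_append, PySem.List.insertBy, hy]
      simp only [Bool.false_eq_true, if_false]
      rw [ih (fun z hz => hl z (by simp [hz]))]

-- stable sort as bucket concatenation: for any strictly increasing key list K
-- covering all keys of xs, sorted(xs, key) is the concatenation over K of the
-- key-k sublists of xs in original order
theorem pv_stable_buckets {α : Type} (key : α → Int) (K : List Int)
    (hK : K.Pairwise (· < ·)) :
    ∀ xs : List α, (∀ x ∈ xs, key x ∈ K) →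
      PySem.List.sorted xs key = K.flatMap (fun k => xs.filter (fun x => key x == k)) := by
  intro xs
  induction xs using List.reverseRecOn with
  | nil =>
      intro _
      rw [(PySem.List.sorted_eq_nil_iff [] key false).mpr rfl]
      simp
  | append_singleton ys x ih =>
      intro hcov
      have hx : key x ∈ K := hcov x (by simp)
      obtain ⟨K1, K2, hKeq⟩ := List.append_of_mem hx
      subst hKeq
      have hKparts := List.pairwise_append.mp hK
      have hK1lt : ∀ k ∈ K1, k < key x := fun k hk => hKparts.2.2 k hk (key x) (by simp)
      have hK2gt : ∀ k ∈ K2, key x < k := (List.pairwise_cons.mp hKparts.2.1).1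
      have hIH := ih (fun y hy => hcov y (by simp [hy]))
      have hL : PySem.List.sorted (ys ++ [x]) key =
          PySem.List.insertBy (fun a b => decide (key a < key b)) x (PySem.List.sorted ys key) := by
        rw [PySem.List.sorted_eq_foldl_insertBy, List.foldl_append,
            ← PySem.List.sorted_eq_foldl_insertBy]
        rfl
      set F : Int → List α := fun k => ys.filter (fun y => key y == k) with hF
      have hIH' : PySem.List.sorted ys key =
          (K1.flatMap F ++ F (key x)) ++ K2.flatMap F := by
        rw [hIH, List.flatMap_append, List.flatMap_cons, List.append_assoc]
      rw [hL, hIH', pv_insertBy_middle]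
      · have h1 : K1.flatMap (fun k => (ys ++ [x]).filter (fun y => key y == k)) = K1.flatMap F := by
          apply List.flatMap_congr
          intro k hk
          rw [List.filter_append]
          have : key x ≠ k := ne_of_gt (hK1lt k hk)
          simp [this, hF]
        have h2 : K2.flatMap (fun k => (ys ++ [x]).filter (fun y => key y == k)) = K2.flatMap F := by
          apply List.flatMap_congr
          intro k hk
          rw [List.filter_append]
          have : key x ≠ k := ne_of_lt (hK2gt k hk)
          simp [this, hF]
        rw [List.flatMap_append, List.flatMap_cons, h1, h2, List.filter_append]
        simp [hF]
      · intro y hy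
        rcases List.mem_append.mp hy with hy1 | hy2
        · obtain ⟨k, hk, hyk⟩ := List.mem_flatMap.mp hy1
          have : key y = k := by simpa using (List.mem_filter.mp hyk).2
          simp [this]
          exact le_of_lt (hK1lt k hk)
        · have : key y = key x := by simpa [hF] using (List.mem_filter.mp hy2).2
          simp [this]
      · intro h hh
        have hmem := List.mem_of_mem_head? hh
        obtain ⟨k, hk, hhk⟩ := List.mem_flatMap.mp hmem
        have : key h = k := by simpa [hF] using (List.mem_filter.mp hhk).2
        simp [this]
        exact hK2gt k hk

-- ---- lexicographic order facts ----

theorem pvLexLt_irrefl (a : Int × Int) : pvLexLt a a = false := by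
  simp [pvLexLt]

theorem pvLexLt_asymm {a b : Int × Int} (h1 : pvLexLt a b = true) (h2 : pvLexLt b a = true) : False := by
  obtain ⟨a1, a2⟩ := a; obtain ⟨b1, b2⟩ := b
  simp [pvLexLt] at h1 h2
  omega

theorem pvLexLt_total {a b : Int × Int} (h : a ≠ b) : pvLexLt a b = true ∨ pvLexLt b a = true := by
  obtain ⟨a1, a2⟩ := a; obtain ⟨b1, b2⟩ := b
  simp [Prod.ext_iff] at h
  simp [pvLexLt]
  omega

theorem pvLexLt_trans {a b c : Int × Int} (h1 : pvLexLt a b = true) (h2 : pvLexLt b c = true) :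
    pvLexLt a c = true := by
  obtain ⟨a1, a2⟩ := a; obtain ⟨b1, b2⟩ := b; obtain ⟨c1, c2⟩ := c
  simp [pvLexLt] at *
  omega

theorem pvMin_not_lt (t : List (Int × Int)) : ∀ h, ∀ y ∈ h :: t, pvLexLt y (pvMin h t) = false := by
  induction t with
  | nil =>
      intro h y hy
      simp at hy
      subst hy
      simp [pvMin, pvLexLt_irrefl]
  | cons x t ih =>
      intro h y hy
      have hstep : pvMin h (x :: t) = pvMin (if pvLexLt x h then x else h) t := by
        simp [pvMin]
      rw [hstep]
      by_cases hx : pvLexLt x h = true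
      · rw [if_pos hx]
        rcases List.mem_cons.mp hy with h1 | h1
        · subst h1
          by_contra hc
          have hc' : pvLexLt y (pvMin x t) = true := by
            cases hxy : pvLexLt y (pvMin x t) <;> simp_all
          exact absurd (pvLexLt_trans hx hc') (by simp [ih x x (by simp)])
        · exact ih x y h1
      · rw [if_neg hx]
        rcases List.mem_cons.mp hy with h1 | h1
        · subst h1
          exact ih y y (by simp)
        · rcases List.mem_cons.mp h1 with h2 | h2
          · subst h2
            by_contra hc
            have hc' : pvLexLt y (pvMin h t) = true := by
              cases hxy : pvLexLt y (pvMin h t) <;> simp_all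
            have hhm : pvLexLt h (pvMin h t) = false := ih h h (by simp)
            by_cases hyh : y = h
            · subst hyh
              simp_all
            · rcases pvLexLt_total hyh with hA | hA
              · exact hx hA
              · exact absurd (pvLexLt_trans hA hc') (by simp [hhm])
          · exact ih h y (by simp [h2])

-- ---- selection extraction (ghost, pair level) ----

def pvSelPairs (ps : List (Int × Int)) : List (Int × Int) :=
  match ps with
  | [] => []
  | h :: t => pvMin h t :: pvSelPairs (PySem.Set.discard (h :: t) (pvMin h t))
termination_by ps.length
decreasing_by
  simp only [PySem.Set.discard]
  exact List.length_filter_lt_length_iff_exists.mpr ⟨pvMin h t, pvMin_mem t h, by simp⟩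

theorem pv_discard_length_lt {s : List (Int × Int)} {m : Int × Int} (hm : m ∈ s) :
    (PySem.Set.discard s m).length < s.length := by
  simp only [PySem.Set.discard]
  exact List.length_filter_lt_length_iff_exists.mpr ⟨m, hm, by simp⟩

theorem pv_mem_discard {s : List (Int × Int)} {m y : Int × Int} :
    y ∈ PySem.Set.discard s m ↔ y ∈ s ∧ y ≠ m := by
  simp [PySem.Set.discard]

theorem pv_discard_perm {s : List (Int × Int)} (hnd : s.Nodup) {m : Int × Int} (hm : m ∈ s) :
    s.Perm (m :: PySem.Set.discard s m) := by
  induction s with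
  | nil => cases hm
  | cons a s ih =>
      by_cases ha : a = m
      · subst ha
        have hfe : s.filter (fun y => !(y == a)) = s := List.filter_eq_self.mpr (fun y hy => by
          have : y ≠ a := fun e => (List.nodup_cons.mp hnd).1 (e ▸ hy)
          simp [this])
        simp [PySem.Set.discard, hfe]
      · have hm' : m ∈ s := by
          rcases List.mem_cons.mp hm with e | e
          · exact absurd e.symm ha
          · exact e
        have hperm := ih (List.nodup_cons.mp hnd).2 hm'
        have hd : PySem.Set.discard (a :: s) m = a :: PySem.Set.discard s m := by
          simp [PySem.Set.discard, ha]
        rw [hd]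
        exact ((hperm.cons a).trans (List.Perm.swap m a _))

theorem pv_discard_nodup {s : List (Int × Int)} (hnd : s.Nodup) (m : Int × Int) :
    (PySem.Set.discard s m).Nodup := by
  simp only [PySem.Set.discard]
  exact hnd.filter _

theorem pvSelPairs_perm (n : Nat) : ∀ ps : List (Int × Int), ps.length ≤ n → ps.Nodup →
    (pvSelPairs ps).Perm ps := by
  induction n with
  | zero =>
      intro ps hlen _
      have : ps = [] := List.eq_nil_of_length_eq_zero (Nat.le_zero.mp hlen)
      subst this
      rw [pvSelPairs]
  | succ n ih =>
      intro ps hlen hnd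
      cases ps with
      | nil => rw [pvSelPairs]
      | cons h t =>
          rw [pvSelPairs]
          have hm := pvMin_mem t h
          have hlt := pv_discard_length_lt (s := h :: t) hm
          have hrec := ih _ (by omega) (pv_discard_nodup hnd (pvMin h t))
          exact ((hrec.cons _).trans (pv_discard_perm hnd hm).symm)

theorem pvSelPairs_pairwise (n : Nat) : ∀ ps : List (Int × Int), ps.length ≤ n → ps.Nodup →
    (pvSelPairs ps).Pairwise (fun a b => pvLexLt a b = true) := by
  induction n with
  | zero =>
      intro ps hlen _
      have : ps = [] := List.eq_nil_of_length_eq_zero (Nat.le_zero.mp hlen)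
      subst this
      rw [pvSelPairs]
      simp
  | succ n ih =>
      intro ps hlen hnd
      cases ps with
      | nil => rw [pvSelPairs]; simp
      | cons h t =>
          rw [pvSelPairs]
          have hm := pvMin_mem t h
          have hlt := pv_discard_length_lt (s := h :: t) hm
          have hndd := pv_discard_nodup hnd (pvMin h t)
          refine List.pairwise_cons.mpr ⟨?_, ih _ (by omega) hndd⟩
          intro y hy
          have hyd : y ∈ PySem.Set.discard (h :: t) (pvMin h t) :=
            (pvSelPairs_perm _ _ (le_refl _) hndd).mem_iff.mp hy
          obtain ⟨hys, hyne⟩ := pv_mem_discard.mp hyd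
          rcases pvLexLt_total hyne with h1 | h1
          · exact absurd h1 (by simp [pvMin_not_lt t h y hys])
          · exact h1

-- two strictly-sorted permutations are equal
theorem pv_sorted_unique : ∀ (l1 : List (Int × Int)) (l2 : List (Int × Int)), l1.Perm l2 →
    l1.Pairwise (fun a b => pvLexLt a b = true) →
    l2.Pairwise (fun a b => pvLexLt a b = true) → l1 = l2 := by
  intro l1
  induction l1 with
  | nil =>
      intro l2 hp _ _
      exact (hp.nil_eq).symm ▸ rfl
  | cons a l1 ih =>
      intro l2 hp h1 h2
      cases l2 with
      | nil => exact absurd hp.symm (by simp)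
      | cons b l2 =>
          by_cases hab : a = b
          · subst hab
            rw [ih l2 hp.cons_inv (List.pairwise_cons.mp h1).2 (List.pairwise_cons.mp h2).2]
          · exfalso
            have hamem : a ∈ b :: l2 := hp.mem_iff.mp (by simp)
            have ha2 : a ∈ l2 := by
              rcases List.mem_cons.mp hamem with e | e
              · exact absurd e hab
              · exact e
            have hbmem : b ∈ a :: l1 := hp.symm.mem_iff.mp (by simp)
            have hb1 : b ∈ l1 := by
              rcases List.mem_cons.mp hbmem with e | e
              · exact absurd e.symm hab
              · exact e
            exact pvLexLt_asymm ((List.pairwise_cons.mp h1).1 b hb1)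
              ((List.pairwise_cons.mp h2).1 a ha2)

-- the while loop is: flatten the selection order, take the first 100 - |nw| entries
theorem pvSelLoop_eq (n : Nat) : ∀ ps : List (Int × Int), ps.length ≤ n → ∀ nw : List Int,
    2 ∣ nw.length →
    pvSelLoop ps nw = nw ++ ((pvSelPairs ps).flatMap (fun p => [p.2, p.1])).take (100 - nw.length) := by
  induction n with
  | zero =>
      intro ps hlen nw _
      have : ps = [] := List.eq_nil_of_length_eq_zero (Nat.le_zero.mp hlen)
      subst this
      rw [pvSelLoop, pvSelPairs]
      simp
  | succ n ih =>
      intro ps hlen nw hev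
      cases ps with
      | nil => rw [pvSelLoop, pvSelPairs]; simp
      | cons h t =>
          rw [pvSelLoop, pvSelPairs]
          by_cases hl : nw.length < 100
          · simp only [hl, if_true]
            have hm := pvMin_mem t h
            have hlt := pv_discard_length_lt (s := h :: t) hm
            have hev' : 2 ∣ (nw ++ [(pvMin h t).2, (pvMin h t).1]).length := by
              simp
              omega
            rw [ih _ (by omega) _ hev']
            have hle : 2 ≤ 100 - nw.length := by omega
            rw [List.flatMap_cons, List.take_append,
                List.take_of_length_le (l := [(pvMin h t).2, (pvMin h t).1]) (by simp; omega)]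
            have h2 : 100 - (nw ++ [(pvMin h t).2, (pvMin h t).1]).length = 100 - nw.length - 2 := by
              simp
              omega
            rw [h2, List.append_assoc]
            simp
          · simp only [hl, if_false]
            have : 100 - nw.length = 0 := by omega
            rw [this]
            simp

-- ---- the count dict is Counter(filtered row) ----

theorem pvCount_eq_counter (row : List Int) :
    pvCount row = PySem.Dict.counter (row.filter (fun v => !(v == 0))) := by
  rw [← PySem.Dict.foldl_insert_getD_add_one_eq_counter]
  unfold pvCount
  generalize PySem.Dict.empty = d
  induction row generalizing d with
  | nil => rfl
  | cons v row ih =>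
      by_cases hv : v = 0
      · subst hv
        simpa using ih d
      · have hb : (v != (0 : Int)) = true := by simp [hv]
        simp only [List.foldl_cons, List.filter_cons, hb, if_true, show (!(v == (0:Int))) = true by simp [hv]]
        exact ih _

-- ---- per-row equivalence ----

theorem pv_flatMap_pair_length (l : List (Int × Int)) (f : Int × Int → List Int)
    (hf : ∀ p, (f p).length = 2) : (l.flatMap f).length = 2 * l.length := by
  induction l with
  | nil => simp
  | cons p l ih => simp [List.flatMap_cons, ih, hf p]; omega

-- the B-side pair set of a row, in the (count, value) encoding
theorem pv_row_core (row : List Int) :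
    pvSelLoop (PySem.Set.ofList ((pvCount row).items.map (fun p => (p.2, p.1)))) [] =
      (pvARow row).take 100 ∧
    (pvARow row).length = 2 * PySem.Dict.size (pvCount row) := by
  have hARow : pvARow row = (PySem.List.sorted
      ((PySem.Dict.counter (PySem.List.sorted row (fun x => x))).items.filter
        (fun p => !(p.1 == 0))) (fun p => p.2)).flatMap (fun p => [p.1, p.2]) := rfl
  rw [hARow]
  set srow := PySem.List.sorted row (fun x => x) with hsrow
  set fl := row.filter (fun x => !(x == 0)) with hfl
  set n : Int → Int := fun k => (List.count k srow : Int) with hn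
  set V : List Int := (PySem.Set.ofList srow).filter (fun k => !(k == 0)) with hV
  set W : List Int := PySem.Set.ofList fl with hW
  -- V is strictly increasing
  have hS_lt : (PySem.Set.ofList srow).Pairwise (· < ·) := by
    have hle : (PySem.Set.ofList srow).Pairwise (· ≤ ·) :=
      List.Pairwise.sublist (pv_ofList_sublist srow) (PySem.List.sorted_pairwise row (fun x => x))
    have hne : (PySem.Set.ofList srow).Pairwise (· ≠ ·) := PySem.Set.nodup_ofList srow
    exact (hle.and hne).imp (fun h => lt_of_le_of_ne h.1 h.2)
  have hVlt : V.Pairwise (· < ·) := hS_lt.filter _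
  have hVnd : V.Nodup := hVlt.imp ne_of_lt
  -- memberships agree
  have hmemVW : ∀ v : Int, v ∈ V ↔ v ∈ W := by
    intro v
    simp [hV, hW, hfl, PySem.Set.mem_ofList, List.mem_filter, hsrow, PySem.List.mem_sorted]
  -- counts agree on V
  have hnm : ∀ k, k ∈ V → (List.count k fl : Int) = n k := by
    intro k hk
    have hk0 : (fun x : Int => !(x == 0)) k = true := (List.mem_filter.mp hk).2
    have h1 : List.count k fl = List.count k row := List.count_filter hk0
    have h2 : List.count k srow = List.count k row :=
      (PySem.List.sorted_perm row (fun x => x) false).count_eq k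
    simp [hn, h1, h2]
  -- A's item list
  have hitems : ((PySem.Set.ofList srow).map (fun k => (k, (List.count k srow : Int)))).filter
      (fun p => !(p.1 == 0)) = V.map (fun k => (k, n k)) := by
    rw [List.filter_map]
    rfl
  -- A's sorted items, bucketed
  set counts := PySem.List.sorted (PySem.Set.ofList (V.map n)) (fun c => c) with hcounts
  have hKlt : counts.Pairwise (· < ·) := PySem.List.sorted_ofList_pairwise_lt (V.map n)
  have hcover : ∀ p ∈ V.map (fun k => (k, n k)), (fun q : Int × Int => q.2) p ∈ counts := by
    intro p hp
    obtain ⟨k, hk, rfl⟩ := List.mem_map.mp hp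
    simp only [hcounts, PySem.List.mem_sorted, PySem.Set.mem_ofList]
    exact List.mem_map.mpr ⟨k, hk, rfl⟩
  have harr : PySem.List.sorted
      ((PySem.Dict.counter srow).items.filter (fun p => !(p.1 == 0))) (fun p => p.2) =
      counts.flatMap (fun c => (V.map (fun k => (k, n k))).filter (fun q => q.2 == c)) := by
    rw [PySem.Dict.items_counter, hitems]
    exact pv_stable_buckets (fun q : Int × Int => q.2) counts hKlt _ hcover
  -- the swapped A-side pair list
  set PA : List (Int × Int) :=
    (counts.flatMap (fun c => (V.map (fun k => (k, n k))).filter (fun q => q.2 == c))).map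
      (fun p => (p.2, p.1)) with hPA
  -- PA is strictly lex-sorted
  have hPApw : PA.Pairwise (fun a b => pvLexLt a b = true) := by
    rw [hPA, List.map_flatMap, List.pairwise_flatMap]
    constructor
    · intro c _
      rw [List.pairwise_map]
      have hpair : (V.map (fun k => (k, n k))).Pairwise (fun p q : Int × Int => p.1 < q.1) := by
        rw [List.pairwise_map]
        exact hVlt
      refine (hpair.filter _).imp_of_mem ?_
      intro p q hp hq hlt
      have hp2 : p.2 = c := by simpa using (List.mem_filter.mp hp).2
      have hq2 : q.2 = c := by simpa using (List.mem_filter.mp hq).2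
      simp [pvLexLt, hp2, hq2, hlt]
    · refine hKlt.imp_of_mem ?_
      intro c c' _ _ hcc x hx y hy
      obtain ⟨p, hp, rfl⟩ := List.mem_map.mp hx
      obtain ⟨q, hq, rfl⟩ := List.mem_map.mp hy
      have hp2 : p.2 = c := by simpa using (List.mem_filter.mp hp).2
      have hq2 : q.2 = c' := by simpa using (List.mem_filter.mp hq).2
      simp [pvLexLt, hp2, hq2, hcc]
  have hPAnd : PA.Nodup := hPApw.imp (fun hab => fun e => by
    subst e
    exact absurd hab (by simp [pvLexLt_irrefl]))
  -- PA membership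
  have hPAmem : ∀ q : Int × Int, q ∈ PA ↔ q.2 ∈ V ∧ q.1 = n q.2 := by
    intro q
    rw [hPA]
    constructor
    · intro hq
      obtain ⟨p, hp, rfl⟩ := List.mem_map.mp hq
      obtain ⟨c, _, hpc⟩ := List.mem_flatMap.mp hp
      obtain ⟨k, hk, rfl⟩ := List.mem_map.mp (List.mem_filter.mp hpc).1
      exact ⟨hk, rfl⟩
    · intro ⟨h1, h2⟩
      refine List.mem_map.mpr ⟨(q.2, q.1), ?_, rfl⟩
      refine List.mem_flatMap.mpr ⟨q.1, ?_, ?_⟩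
      · rw [h2]
        exact hcover _ (List.mem_map.mpr ⟨q.2, h1, rfl⟩)
      · refine List.mem_filter.mpr ⟨List.mem_map.mpr ⟨q.2, h1, by rw [h2]⟩, by simp⟩
  -- the B-side pair list
  have hBitems : (pvCount row).items = W.map (fun k => (k, (List.count k fl : Int))) := by
    rw [pvCount_eq_counter, ← hfl, PySem.Dict.items_counter, ← hW]
  set PB : List (Int × Int) := W.map (fun k => ((List.count k fl : Int), k)) with hPB
  have hmapswap : (pvCount row).items.map (fun p : Int × Int => (p.2, p.1)) = PB := by
    rw [hBitems, List.map_map]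
    rfl
  have hPBnd : PB.Nodup := by
    refine (PySem.Set.nodup_ofList fl).map ?_
    intro a b hab
    simpa using congrArg Prod.snd hab
  have hPBset : PySem.Set.ofList PB = PB := PySem.Set.ofList_eq_self_of_nodup PB hPBnd
  have hPBmem : ∀ q : Int × Int, q ∈ PB ↔ q.2 ∈ V ∧ q.1 = n q.2 := by
    intro q
    rw [hPB]
    constructor
    · intro hq
      obtain ⟨k, hk, rfl⟩ := List.mem_map.mp hq
      have hkV : k ∈ V := (hmemVW k).mpr hk
      exact ⟨hkV, hnm k hkV⟩
    · intro ⟨h1, h2⟩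
      refine List.mem_map.mpr ⟨q.2, (hmemVW q.2).mp h1, ?_⟩
      rw [hnm q.2 h1, ← h2]
  -- selection over PB gives PA
  have hperm : PB.Perm PA :=
    (List.perm_ext_iff_of_nodup hPBnd hPAnd).mpr (fun q => (hPBmem q).trans (hPAmem q).symm)
  have hsel : pvSelPairs PB = PA :=
    pv_sorted_unique _ _ ((pvSelPairs_perm PB.length PB (le_refl _) hPBnd).trans hperm)
      (pvSelPairs_pairwise PB.length PB (le_refl _) hPBnd) hPApw
  constructor
  · rw [hmapswap, hPBset,
        pvSelLoop_eq PB.length PB (le_refl _) [] (by simp), hsel, hPA,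
        List.flatMap_map, harr]
    simp
  · rw [harr, pv_flatMap_pair_length _ _ (fun p => rfl)]
    have hlenA : (counts.flatMap
        (fun c => (V.map (fun k => (k, n k))).filter (fun q => q.2 == c))).length = PA.length := by
      rw [hPA, List.length_map]
    rw [hlenA, ← hperm.length_eq, hPB, List.length_map]
    show 2 * W.length = 2 * (pvCount row).items.length
    rw [hBitems, List.length_map]

-- take 100 only looks at the first 100 entries of the left part
theorem pv_take_append_take (a b : List Int) :
    (a.take 100 ++ b).take 100 = (a ++ b).take 100 := by
  rw [List.take_append, List.take_append, List.take_take]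
  have h1 : min 100 100 = 100 := rfl
  rw [h1]
  congr 1
  rw [List.length_take]
  congr 1
  omega

theorem row_c_eq (my_mat : List (List Int)) : row_c my_mat = row_c_alt my_mat := by
  unfold row_c row_c_alt
  have hs : ∀ {α : Type} (xs : List α), PySem.List.slice xs none (some 100) = xs.take 100 := by
    intro α xs
    rw [PySem.List.slice_to xs (by norm_num)]
    rw [show Int.toNat 100 = 100 from rfl]
  simp only [hs]
  -- the two max?ed length lists are the same list
  have hlens : (my_mat.map pvARow).map (fun r => (r.length : Int)) =
      (my_mat.map pvCount).map (fun c => (2 * (PySem.Dict.size c : Int))) := by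
    rw [List.map_map, List.map_map]
    apply List.map_congr_left
    intro row _
    simp only [Function.comp_apply]
    rw [(pv_row_core row).2]
    push_cast
    ring
  rw [← hlens]
  generalize (PySem.List.max?
      ((my_mat.map pvARow).map (fun r => (r.length : Int))) (fun y => y)).getD 0 = M
  simp only [← List.map_take, List.map_map]
  apply List.map_congr_left
  intro row _
  simp only [Function.comp_apply]
  have hpadA : (if ((pvARow row).length : Int) < M then
        pvARow row ++ PySem.List.pyRepeat [0] (M - ((pvARow row).length : Int))
      else pvARow row) =
      pvARow row ++ PySem.List.pyRepeat [0] (M - ((pvARow row).length : Int)) := by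
    split_ifs with h
    · rfl
    · rw [PySem.List.pyRepeat_singleton, Int.toNat_of_nonpos (by omega), List.replicate_zero,
          List.append_nil]
  rw [hpadA, (pv_row_core row).1]
  have hlen : (2 * ((PySem.Dict.size (pvCount row)) : Int)) = ((pvARow row).length : Int) := by
    rw [(pv_row_core row).2]
    push_cast
    ring
  rw [hlen, pv_take_append_take]

-- ===== VERDICT (by name: the statement is the Claim_ definition above) =====
theorem row_c_spec : Claim_equal_row_c := by
  intro my_mat _ _
  unfold Spec_row_c
  exact row_c_eq my_mat
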